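-- pv_equiv track=rewrite | github.com/Jeck11-11/greyping-crawler | src/ssl_checker.py | _grade_cert
-- ===== SOURCE A (Python) =====
-- def _grade_cert(issues: list[str]) -> str:
--     if not issues:
--         return "A"
--     severities = {"expired": 3, "self-signed": 3, "sha1": 2, "expiring": 1, "weak": 2, "deprecated": 2}
--     worst = 0
--     for issue in issues:
--         low = issue.lower()
--         for keyword, level in severities.items():
--             if keyword in low:
--                 worst = max(worst, level)
--     if worst >= 3:
--         return "F"
--     if worst == 2:
--         return "C"
--     if worst == 1:
--         return "B"
--     return "A"
-- ===== SOURCE B (Python) =====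
-- def _grade_cert(issues: list[str]) -> str:
--     lows = [i.lower() for i in issues]
--     if any(k in s for s in lows for k in ("expired", "self-signed")):
--         return "F"
--     if any(k in s for s in lows for k in ("sha1", "weak", "deprecated")):
--         return "C"
--     if any("expiring" in s for s in lows):
--         return "B"
--     return "A"
-- ===== Notes on version B (the rewrite author's own statement) =====
-- stated objective: simpler
-- what changed: Replaced the accumulate-numeric-max-then-map structure (dict of severities, nested loops tracking the worst level) with grouped priority-ordered substring tests over the lowercased issues with early returns.
import Mathlib
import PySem

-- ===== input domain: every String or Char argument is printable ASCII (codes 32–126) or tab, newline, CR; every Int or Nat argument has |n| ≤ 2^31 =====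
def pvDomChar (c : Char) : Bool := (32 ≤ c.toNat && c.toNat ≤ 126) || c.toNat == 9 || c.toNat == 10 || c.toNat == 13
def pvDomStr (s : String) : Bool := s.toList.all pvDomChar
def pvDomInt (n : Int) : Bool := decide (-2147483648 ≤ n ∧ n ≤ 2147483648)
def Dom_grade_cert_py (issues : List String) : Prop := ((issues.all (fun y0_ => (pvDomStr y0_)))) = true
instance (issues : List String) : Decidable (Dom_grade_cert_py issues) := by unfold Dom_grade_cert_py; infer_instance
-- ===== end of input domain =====

-- B replaces A's accumulate-numeric-max-then-map structure with grouped, priority-ordered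
-- substring tests with early returns (objective: simpler).

-- ===== PORT A =====
def grade_cert_py (issues : List String) : String :=
  if issues = [] then "A"
  else
    let severities : PySem.Dict String Int :=
      PySem.Dict.ofList [("expired", 3), ("self-signed", 3), ("sha1", 2), ("expiring", 1), ("weak", 2), ("deprecated", 2)]
    let worst : Int := issues.foldl (fun worst issue =>
      let low := PySem.Str.lower issue
      severities.items.foldl (fun worst kl =>
        if PySem.Str.isIn kl.1 low then max worst kl.2 else worst) worst) 0
    if worst ≥ 3 then "F"
    else if worst = 2 then "C"
    else if worst = 1 then "B"
    else "A"

-- ===== PORT B =====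
def grade_cert_py_alt (issues : List String) : String :=
  let lows := issues.map PySem.Str.lower
  if lows.any (fun s => (["expired", "self-signed"] : List String).any (fun k => PySem.Str.isIn k s)) then "F"
  else if lows.any (fun s => (["sha1", "weak", "deprecated"] : List String).any (fun k => PySem.Str.isIn k s)) then "C"
  else if lows.any (fun s => PySem.Str.isIn "expiring" s) then "B"
  else "A"

-- ===== PRECONDITION & SPEC =====
def Spec_grade_cert_py (issues : List String) (out : String) : Prop := out = grade_cert_py_alt issues
instance (issues : List String) (out : String) : Decidable (Spec_grade_cert_py issues out) := by unfold Spec_grade_cert_py; infer_instance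

-- ===== CLAIM (what is proved, stated in full; the proofs are below) =====
def Claim_equal_grade_cert_py : Prop := ∀ (issues : List String), Dom_grade_cert_py issues → Spec_grade_cert_py issues (grade_cert_py issues)

-- ===== LEMMAS AND PROOFS =====

-- the severity level A's inner dict loop assigns to one (lowercased) issue string
def pvLvl (low : String) : Int :=
  if PySem.Str.isIn "expired" low || PySem.Str.isIn "self-signed" low then 3
  else if PySem.Str.isIn "sha1" low || PySem.Str.isIn "weak" low || PySem.Str.isIn "deprecated" low then 2
  else if PySem.Str.isIn "expiring" low then 1
  else 0

-- maximum severity over the lowercased issues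
def pvM (lows : List String) : Int := lows.foldl (fun m s => max m (pvLvl s)) 0

lemma pv_items_eval :
    (PySem.Dict.ofList ([("expired", 3), ("self-signed", 3), ("sha1", 2), ("expiring", 1), ("weak", 2), ("deprecated", 2)] : List (String × Int))).items
    = [("expired", 3), ("self-signed", 3), ("sha1", 2), ("expiring", 1), ("weak", 2), ("deprecated", 2)] := by
  decide

lemma pv_inner (low : String) (w : Int) (hw : 0 ≤ w) :
    ([("expired", (3:Int)), ("self-signed", 3), ("sha1", 2), ("expiring", 1), ("weak", 2), ("deprecated", 2)] : List (String × Int)).foldl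
      (fun worst kl => if PySem.Str.isIn kl.1 low then max worst kl.2 else worst) w
    = max w (pvLvl low) := by
  simp only [List.foldl, pvLvl]
  cases h1 : PySem.Str.isIn "expired" low <;>
  cases h2 : PySem.Str.isIn "self-signed" low <;>
  cases h3 : PySem.Str.isIn "sha1" low <;>
  cases h4 : PySem.Str.isIn "expiring" low <;>
  cases h5 : PySem.Str.isIn "weak" low <;>
  cases h6 : PySem.Str.isIn "deprecated" low <;>
  simp_all

lemma pv_fold_ge (lows : List String) (w : Int) :
    w ≤ lows.foldl (fun m s => max m (pvLvl s)) w := by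
  induction lows generalizing w with
  | nil => simp
  | cons a t ih => exact le_trans (le_max_left w (pvLvl a)) (ih _)

lemma pvM_nonneg (lows : List String) : 0 ≤ pvM lows := pv_fold_ge lows 0

lemma pv_outer (lows : List String) (w : Int) (hw : 0 ≤ w) :
    lows.foldl (fun m s => max m (pvLvl s)) w = max w (pvM lows) := by
  induction lows generalizing w with
  | nil => simp [pvM]; omega
  | cons a t ih =>
    have h1 := ih (max w (pvLvl a)) (le_trans hw (le_max_left _ _))
    have h2 := ih (max 0 (pvLvl a)) (le_max_left _ _)
    have h3 := pvM_nonneg t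
    simp only [pvM, List.foldl] at *
    rw [h1, h2]
    omega

lemma pvM_ge_iff (lows : List String) (c : Int) (hc : 0 < c) :
    c ≤ pvM lows ↔ ∃ s ∈ lows, c ≤ pvLvl s := by
  induction lows with
  | nil => simp [pvM]; omega
  | cons a t ih =>
    have hM : pvM (a :: t) = max (max 0 (pvLvl a)) (pvM t) := by
      simpa [pvM, List.foldl] using pv_outer t (max 0 (pvLvl a)) (le_max_left _ _)
    constructor
    · intro h
      rw [hM] at h
      rcases le_max_iff.mp h with h' | h'
      · rcases le_max_iff.mp h' with h'' | h''
        · omega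
        · exact ⟨a, by simp, h''⟩
      · rcases ih.mp h' with ⟨s, hs, hls⟩
        exact ⟨s, by simp [hs], hls⟩
    · rintro ⟨s, hs, hls⟩
      rw [hM]
      rcases List.mem_cons.mp hs with rfl | hs'
      · exact le_max_of_le_left (le_max_of_le_right hls)
      · exact le_max_of_le_right (ih.mpr ⟨s, hs', hls⟩)

lemma pvLvl_ge3_iff (s : String) :
    3 ≤ pvLvl s ↔ ((["expired", "self-signed"] : List String).any (fun k => PySem.Str.isIn k s)) = true := by
  unfold pvLvl
  cases h1 : PySem.Str.isIn "expired" s <;>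
  cases h2 : PySem.Str.isIn "self-signed" s <;>
  cases h3 : PySem.Str.isIn "sha1" s <;>
  cases h4 : PySem.Str.isIn "expiring" s <;>
  cases h5 : PySem.Str.isIn "weak" s <;>
  cases h6 : PySem.Str.isIn "deprecated" s <;>
  simp_all

lemma pvLvl_ge2_iff (s : String) :
    2 ≤ pvLvl s ↔ ((["sha1", "weak", "deprecated"] : List String).any (fun k => PySem.Str.isIn k s)
      || (["expired", "self-signed"] : List String).any (fun k => PySem.Str.isIn k s)) = true := by
  unfold pvLvl
  cases h1 : PySem.Str.isIn "expired" s <;>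
  cases h2 : PySem.Str.isIn "self-signed" s <;>
  cases h3 : PySem.Str.isIn "sha1" s <;>
  cases h4 : PySem.Str.isIn "expiring" s <;>
  cases h5 : PySem.Str.isIn "weak" s <;>
  cases h6 : PySem.Str.isIn "deprecated" s <;>
  simp_all

lemma pvLvl_ge1_iff (s : String) :
    1 ≤ pvLvl s ↔ (PySem.Str.isIn "expiring" s
      || (["sha1", "weak", "deprecated"] : List String).any (fun k => PySem.Str.isIn k s)
      || (["expired", "self-signed"] : List String).any (fun k => PySem.Str.isIn k s)) = true := by
  unfold pvLvl
  cases h1 : PySem.Str.isIn "expired" s <;>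
  cases h2 : PySem.Str.isIn "self-signed" s <;>
  cases h3 : PySem.Str.isIn "sha1" s <;>
  cases h4 : PySem.Str.isIn "expiring" s <;>
  cases h5 : PySem.Str.isIn "weak" s <;>
  cases h6 : PySem.Str.isIn "deprecated" s <;>
  simp_all

lemma pv_any_or {α : Type} (l : List α) (p q : α → Bool) :
    (l.any p || l.any q) = l.any (fun s => p s || q s) := by
  induction l with
  | nil => rfl
  | cons a t ih =>
    simp only [List.any_cons, ← ih]
    cases p a <;> cases q a <;> cases t.any p <;> cases t.any q <;> rfl

lemma pv_anyF (lows : List String) :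
    (lows.any (fun s => (["expired", "self-signed"] : List String).any (fun k => PySem.Str.isIn k s))) = true
    ↔ 3 ≤ pvM lows := by
  rw [pvM_ge_iff lows 3 (by omega)]
  simp only [List.any_eq_true]
  refine exists_congr fun s => and_congr_right fun _ => ?_
  rw [pvLvl_ge3_iff]
  try simp only [List.any_eq_true]

lemma pv_anyC (lows : List String) :
    (lows.any (fun s => (["sha1", "weak", "deprecated"] : List String).any (fun k => PySem.Str.isIn k s))
      || lows.any (fun s => (["expired", "self-signed"] : List String).any (fun k => PySem.Str.isIn k s))) = true
    ↔ 2 ≤ pvM lows := by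
  rw [pv_any_or, pvM_ge_iff lows 2 (by omega)]
  simp only [List.any_eq_true]
  refine exists_congr fun s => and_congr_right fun _ => ?_
  rw [pvLvl_ge2_iff]
  try simp only [List.any_eq_true, Bool.or_eq_true]

lemma pv_anyB (lows : List String) :
    (lows.any (fun s => PySem.Str.isIn "expiring" s)
      || lows.any (fun s => (["sha1", "weak", "deprecated"] : List String).any (fun k => PySem.Str.isIn k s))
      || lows.any (fun s => (["expired", "self-signed"] : List String).any (fun k => PySem.Str.isIn k s))) = true
    ↔ 1 ≤ pvM lows := by
  rw [pv_any_or, pv_any_or, pvM_ge_iff lows 1 (by omega)]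
  simp only [List.any_eq_true]
  refine exists_congr fun s => and_congr_right fun _ => ?_
  rw [pvLvl_ge1_iff]
  try simp only [List.any_eq_true, Bool.or_eq_true]

lemma pvLvl_le (s : String) : pvLvl s ≤ 3 := by
  unfold pvLvl; split_ifs <;> omega

lemma pvM_le (lows : List String) : pvM lows ≤ 3 := by
  by_contra h
  rcases (pvM_ge_iff lows 4 (by omega)).mp (by omega) with ⟨s, _, hls⟩
  have := pvLvl_le s
  omega

-- ===== VERDICT (by name: the statement is the Claim_ definition above) =====
theorem grade_cert_py_spec : Claim_equal_grade_cert_py := by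
  intro issues _
  unfold Spec_grade_cert_py grade_cert_py grade_cert_py_alt
  rcases hE : issues with _ | ⟨a, t⟩
  · simp
  rw [if_neg (by simp)]
  rw [← hE]
  simp only [pv_items_eval]
  have hw : issues.foldl (fun worst issue =>
      ([("expired", (3:Int)), ("self-signed", 3), ("sha1", 2), ("expiring", 1), ("weak", 2), ("deprecated", 2)] : List (String × Int)).foldl
        (fun worst kl => if PySem.Str.isIn kl.1 (PySem.Str.lower issue) then max worst kl.2 else worst) worst) 0
      = pvM (issues.map PySem.Str.lower) := by
    have key : ∀ (l : List String) (w : Int), 0 ≤ w → l.foldl (fun worst issue =>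
        ([("expired", (3:Int)), ("self-signed", 3), ("sha1", 2), ("expiring", 1), ("weak", 2), ("deprecated", 2)] : List (String × Int)).foldl
          (fun worst kl => if PySem.Str.isIn kl.1 (PySem.Str.lower issue) then max worst kl.2 else worst) worst) w
        = (l.map PySem.Str.lower).foldl (fun m s => max m (pvLvl s)) w := by
      intro l
      induction l with
      | nil => intro w _; rfl
      | cons x xs ih =>
        intro w hw
        conv_lhs => rw [List.foldl_cons]
        conv_rhs => rw [List.map_cons, List.foldl_cons]
        rw [pv_inner _ _ hw]
        exact ih _ (le_trans hw (le_max_left _ _))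
    rw [key _ _ le_rfl]
    have h1 := pv_outer (issues.map PySem.Str.lower) 0 le_rfl
    have h2 := pvM_nonneg (issues.map PySem.Str.lower)
    omega
  rw [hw]
  clear hw
  set lows := issues.map PySem.Str.lower with hlows
  have hF := pv_anyF lows
  have hC := pv_anyC lows
  have hB := pv_anyB lows
  have hle := pvM_le lows
  have hge := pvM_nonneg lows
  clear hlows
  cases hf : lows.any (fun s => (["expired", "self-signed"] : List String).any (fun k => PySem.Str.isIn k s)) <;>
  cases hc : lows.any (fun s => (["sha1", "weak", "deprecated"] : List String).any (fun k => PySem.Str.isIn k s)) <;>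
  cases hb : lows.any (fun s => PySem.Str.isIn "expiring" s) <;>
  rw [hf] at hF <;> rw [hc, hf] at hC <;> rw [hb, hc, hf] at hB <;>
  simp at hF hC hB <;>
  split_ifs <;>
  first
    | rfl
    | (exfalso; omega)
    | (exfalso; simp_all)
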